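-- pv_equiv track=rewrite | github.com/STEyPan/PythonGit42 | src/classwork/lesson18/main.py | flowers_bed_rec
-- ===== SOURCE A (Python) =====
-- def flowers_bed_rec(flowers, i = 0, countEmpty = 0, max_flowers = 0):
--     if i == len(flowers):
--         if countEmpty > max_flowers:
--             max_flowers = countEmpty
--         return max_flowers
--     if flowers[i] == "0":
--         return flowers_bed_rec(flowers, i + 1, countEmpty+1, max_flowers)
--     else:
--         countEmpty -= 1
--         if countEmpty > max_flowers:
--             max_flowers = countEmpty
--         countEmpty = -1
--         return flowers_bed_rec(flowers, i + 1, countEmpty, max_flowers)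
-- ===== SOURCE B (Python) =====
-- def flowers_bed_rec(flowers, i = 0, countEmpty = 0, max_flowers = 0):
--     for k in range(i, len(flowers)):
--         if flowers[k] == "0":
--             countEmpty += 1
--         else:
--             countEmpty -= 1
--             if countEmpty > max_flowers:
--                 max_flowers = countEmpty
--             countEmpty = -1
--     if countEmpty > max_flowers:
--         max_flowers = countEmpty
--     return max_flowers
-- ===== Notes on version B (the rewrite author's own statement) =====
-- stated objective: simpler
-- what changed: Replaces A's tail recursion (with three accumulator parameters threaded through recursive calls) by a single iterative for-loop over range(i, len(flowers)) updating local variables, with the same final adjustment after the loop.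
import Mathlib
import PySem

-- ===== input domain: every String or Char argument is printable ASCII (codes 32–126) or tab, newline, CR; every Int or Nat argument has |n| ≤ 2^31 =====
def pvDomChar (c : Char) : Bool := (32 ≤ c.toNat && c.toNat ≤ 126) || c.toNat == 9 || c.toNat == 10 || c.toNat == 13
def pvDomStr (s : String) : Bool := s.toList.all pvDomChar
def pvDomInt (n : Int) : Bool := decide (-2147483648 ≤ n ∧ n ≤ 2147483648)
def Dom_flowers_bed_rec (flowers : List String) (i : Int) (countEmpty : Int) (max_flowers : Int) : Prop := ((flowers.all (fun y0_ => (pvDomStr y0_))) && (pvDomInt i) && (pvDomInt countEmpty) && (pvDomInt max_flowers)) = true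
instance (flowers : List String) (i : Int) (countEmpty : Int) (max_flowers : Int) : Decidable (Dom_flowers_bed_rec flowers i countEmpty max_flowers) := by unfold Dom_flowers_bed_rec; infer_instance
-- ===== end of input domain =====

-- B replaces A's accumulator tail recursion by an iterative single pass (a foldl over the
-- index range) with the same state; objective: simpler (no speed claim).

-- ===== PORT A =====
-- Termination helper for the port's recursion (cited by name in decreasing_by):
-- a successful Python index access means -len ≤ i < len.
theorem pvGetSomeBounds (xs : List String) (i : Int) (x : String)
    (h : PySem.List.pyGet? xs i = some x) : i < xs.length ∧ -(xs.length : Int) ≤ i := by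
  simp only [PySem.List.pyGet?, PySem.List.pyIdx?] at h
  split at h
  · split at h
    · simp only [Option.bind_some] at h
      have := List.getElem?_eq_some_iff.mp h
      omega
    · simp at h
  · split at h
    · rename_i h1 h2
      omega
    · simp at h

def flowers_bed_rec (flowers : List String) (i : Int) (countEmpty : Int) (max_flowers : Int) : Int :=
  if i = (flowers.length : Int) then
    if countEmpty > max_flowers then countEmpty else max_flowers
  else
    match _h : PySem.List.pyGet? flowers i with
    | none => 0  -- flowers[i] raises IndexError in Python: outside Pre_
    | some s =>
      if s = "0" then
        flowers_bed_rec flowers (i + 1) (countEmpty + 1) max_flowers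
      else
        let c := countEmpty - 1
        flowers_bed_rec flowers (i + 1) (-1) (if c > max_flowers then c else max_flowers)
termination_by ((flowers.length : Int) - i).toNat
decreasing_by
  · have := pvGetSomeBounds flowers i _ _h; omega
  · have := pvGetSomeBounds flowers i _ _h; omega

-- ===== PORT B =====
def flowers_bed_rec_alt (flowers : List String) (i : Int) (countEmpty : Int) (max_flowers : Int) : Int :=
  let st := (PySem.List.pyRange i (flowers.length : Int) 1).foldl
    (fun (st : Int × Int) k =>
      if PySem.List.pyGetD flowers k "" = "0" then (st.1 + 1, st.2)
      else
        let c := st.1 - 1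
        (-1, if c > st.2 then c else st.2))
    (countEmpty, max_flowers)
  if st.1 > st.2 then st.1 else st.2

-- ===== PRECONDITION & SPEC =====
-- Pre_ excludes exactly the inputs where Python A raises IndexError: i > len(flowers)
-- or i < -len(flowers) (flowers[i] is evaluated before any base case can stop the recursion).
def Pre_flowers_bed_rec (flowers : List String) (i : Int) (countEmpty : Int) (max_flowers : Int) : Prop :=
  -(flowers.length : Int) ≤ i ∧ i ≤ (flowers.length : Int)

instance (flowers : List String) (i : Int) (countEmpty : Int) (max_flowers : Int) : Decidable (Pre_flowers_bed_rec flowers i countEmpty max_flowers) := by unfold Pre_flowers_bed_rec; infer_instance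

def pvWitness_flowers_bed_rec : List String × Int × Int × Int := (["0", "1", "0"], 0, 0, 0)

def Spec_flowers_bed_rec (flowers : List String) (i : Int) (countEmpty : Int) (max_flowers : Int) (out : Int) : Prop := out = flowers_bed_rec_alt flowers i countEmpty max_flowers
instance (flowers : List String) (i : Int) (countEmpty : Int) (max_flowers : Int) (out : Int) : Decidable (Spec_flowers_bed_rec flowers i countEmpty max_flowers out) := by unfold Spec_flowers_bed_rec; infer_instance

-- ===== CLAIM (what is proved, stated in full; the proofs are below) =====
def Claim_equal_flowers_bed_rec : Prop := ∀ (flowers : List String) (i : Int) (countEmpty : Int) (max_flowers : Int), Dom_flowers_bed_rec flowers i countEmpty max_flowers → Pre_flowers_bed_rec flowers i countEmpty max_flowers → Spec_flowers_bed_rec flowers i countEmpty max_flowers (flowers_bed_rec flowers i countEmpty max_flowers)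


-- ===== LEMMAS AND PROOFS =====
theorem pvGetD_of_some (xs : List String) (i : Int) (x : String) (d : String)
    (h : PySem.List.pyGet? xs i = some x) : PySem.List.pyGetD xs i d = x := by
  simp [PySem.List.pyGetD, h]

theorem pvGet_isSome (xs : List String) (i : Int)
    (h1 : -(xs.length : Int) ≤ i) (h2 : i < xs.length) :
    ∃ s, PySem.List.pyGet? xs i = some s := by
  simp only [PySem.List.pyGet?, PySem.List.pyIdx?]
  split
  · exact ⟨_, by rw [Option.bind_some]; exact List.getElem?_eq_getElem (by omega)⟩
  · exact ⟨_, by rw [Option.bind_some]; exact List.getElem?_eq_getElem (by omega)⟩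

theorem pvKey (flowers : List String) : ∀ (n : Nat) (i c m : Int),
    ((flowers.length : Int) - i).toNat = n →
    -(flowers.length : Int) ≤ i → i ≤ (flowers.length : Int) →
    flowers_bed_rec flowers i c m = flowers_bed_rec_alt flowers i c m := by
  intro n
  induction n with
  | zero =>
    intro i c m hn h1 h2
    have hi : i = (flowers.length : Int) := by omega
    subst hi
    rw [flowers_bed_rec, if_pos rfl]
    simp [flowers_bed_rec_alt, PySem.List.pyRange_one_eq_nil le_rfl]
  | succ n ih =>
    intro i c m hn h1 h2
    have hlt : i < (flowers.length : Int) := by omega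
    obtain ⟨s, hs⟩ := pvGet_isSome flowers i h1 hlt
    rw [flowers_bed_rec, if_neg (by omega)]
    split
    · rename_i heq
      rw [hs] at heq; simp at heq
    · rename_i s' heq
      rw [hs] at heq
      obtain rfl : s = s' := by injection heq
      by_cases h0 : s = "0"
      · rw [if_pos h0, ih (i + 1) (c + 1) m (by omega) (by omega) (by omega)]
        simp only [flowers_bed_rec_alt]
        rw [PySem.List.pyRange_one_cons hlt, List.foldl_cons]
        simp only [pvGetD_of_some flowers i s "" hs, if_pos h0]
      · rw [if_neg h0]
        rw [ih (i + 1) (-1) (if c - 1 > m then c - 1 else m) (by omega) (by omega) (by omega)]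
        simp only [flowers_bed_rec_alt]
        rw [PySem.List.pyRange_one_cons hlt, List.foldl_cons]
        simp only [pvGetD_of_some flowers i s "" hs, if_neg h0]

-- ===== VERDICT (by name: the statement is the Claim_ definition above) =====
theorem flowers_bed_rec_spec : Claim_equal_flowers_bed_rec := by
  intro flowers i c m _ hpre
  unfold Spec_flowers_bed_rec
  exact pvKey flowers ((flowers.length : Int) - i).toNat i c m rfl hpre.1 hpre.2
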